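-- pv_equiv track=rewrite | github.com/28921085/paper | Dead Man Talking/chat/gen_glm_data/split_data.py | pair_conversations
-- ===== SOURCE A (Python) =====
-- AItag="assistant"
--
-- roletag="role"
--
-- def pair_conversations(conversations):
--     paired = []
--     temp_pair = []
--     for convo in conversations:
--         temp_pair.append(convo)
--         if convo[roletag] == AItag:
--             paired.append(temp_pair)
--             temp_pair = []
--     return paired
-- ===== SOURCE B (Python) =====
-- AItag = "assistant"
--
-- roletag = "role"
--
--
-- def pair_conversations(conversations):
--     # Boundary-index decomposition: find assistant positions, then slice.
--     bounds = [i for i, convo in enumerate(conversations) if convo[roletag] == AItag]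
--     groups = []
--     prev = 0
--     for b in bounds:
--         groups.append(conversations[prev:b + 1])
--         prev = b + 1
--     return groups
-- ===== Notes on version B (the rewrite author's own statement) =====
-- stated objective: alternative
-- what changed: B first collects the boundary indices of assistant turns and then slices the list between consecutive boundaries, instead of A's single pass with a temp-pair accumulator buffer.
import Mathlib
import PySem

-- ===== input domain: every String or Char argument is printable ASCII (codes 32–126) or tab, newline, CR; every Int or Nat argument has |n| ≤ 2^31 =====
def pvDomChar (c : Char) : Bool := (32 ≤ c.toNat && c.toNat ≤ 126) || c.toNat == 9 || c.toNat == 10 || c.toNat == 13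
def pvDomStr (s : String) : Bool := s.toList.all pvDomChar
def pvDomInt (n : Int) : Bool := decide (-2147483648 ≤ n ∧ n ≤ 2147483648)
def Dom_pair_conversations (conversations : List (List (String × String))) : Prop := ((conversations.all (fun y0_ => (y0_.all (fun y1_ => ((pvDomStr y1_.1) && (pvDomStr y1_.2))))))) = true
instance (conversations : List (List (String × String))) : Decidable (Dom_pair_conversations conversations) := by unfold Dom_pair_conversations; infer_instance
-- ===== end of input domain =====

-- B replaces A's temp-pair accumulator pass by a boundary-index decomposition: collect assistant positions, then slice between consecutive boundaries (alternative decomposition, same return value).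
-- Pre_ excludes exactly the inputs on which Python A raises KeyError (a turn with no "role" key).


-- ===== PORT A =====
-- loop body of A: temp_pair.append(convo); if convo["role"] == "assistant": paired.append(temp_pair); temp_pair = []
def pvStepA (s : List (List (List (String × String))) × List (List (String × String)))
    (convo : List (String × String)) :
    List (List (List (String × String))) × List (List (String × String)) :=
  let temp_pair := s.2 ++ [convo]
  if PySem.Dict.get? (PySem.Dict.mk convo) "role" == some "assistant" then
    (s.1 ++ [temp_pair], [])
  else
    (s.1, temp_pair)

def pair_conversations (conversations : List (List (String × String))) : List (List (List (String × String))) :=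
  (conversations.foldl pvStepA ([], [])).1

-- ===== PORT B =====
-- loop body of B: groups.append(conversations[prev:b+1]); prev = b + 1
def pvStepB (full : List (List (String × String)))
    (s : List (List (List (String × String))) × Int) (b : Int) :
    List (List (List (String × String))) × Int :=
  (s.1 ++ [PySem.List.slice full (some s.2) (some (b + 1))], b + 1)

def pair_conversations_alt (conversations : List (List (String × String))) : List (List (List (String × String))) :=
  -- bounds = [i for i, convo in enumerate(conversations) if convo["role"] == "assistant"]
  let bounds : List Int :=
    ((PySem.List.enumerate conversations 0).filter
      (fun p => PySem.Dict.get? (PySem.Dict.mk p.2) "role" == some "assistant")).map (·.1)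
  (bounds.foldl (pvStepB conversations) ([], (0 : Int))).1

-- ===== PRECONDITION & SPEC =====
-- Pre_ excludes exactly the inputs where some conversation turn lacks a "role" key, on which Python A raises KeyError (B raises there too).
def Pre_pair_conversations (conversations : List (List (String × String))) : Prop :=
  ∀ convo ∈ conversations, convo.any (fun kv => kv.1 == "role") = true
instance (conversations : List (List (String × String))) : Decidable (Pre_pair_conversations conversations) := by unfold Pre_pair_conversations; infer_instance

def pvWitness_pair_conversations : (List (List (String × String))) :=
  [[("role", "user"), ("content", "hi")], [("role", "assistant"), ("content", "hello")]]

def Spec_pair_conversations (conversations : List (List (String × String))) (out : List (List (List (String × String)))) : Prop := out = pair_conversations_alt conversations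
instance (conversations : List (List (String × String))) (out : List (List (List (String × String)))) : Decidable (Spec_pair_conversations conversations out) := by unfold Spec_pair_conversations; infer_instance

-- ===== CLAIM (what is proved, stated in full; the proofs are below) =====
def Claim_equal_pair_conversations : Prop := ∀ (conversations : List (List (String × String))), Dom_pair_conversations conversations → Pre_pair_conversations conversations → Spec_pair_conversations conversations (pair_conversations conversations)

-- ===== LEMMAS AND PROOFS =====

-- the shared turn test (proof-side abbreviation; both ports spell it out inline)
def pvIsA (convo : List (String × String)) : Bool :=
  PySem.Dict.get? (PySem.Dict.mk convo) "role" == some "assistant"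

-- canonical recursion: groups of turns ending at an assistant turn, with pending prefix `pre`
def pvCore (cs : List (List (String × String))) (pre : List (List (String × String))) :
    List (List (List (String × String))) :=
  match cs with
  | [] => []
  | c :: r => if pvIsA c then (pre ++ [c]) :: pvCore r [] else pvCore r (pre ++ [c])

-- positions of assistant turns, relative to the head of cs
def pvBounds (cs : List (List (String × String))) : List Nat :=
  match cs with
  | [] => []
  | c :: r => if pvIsA c then 0 :: (pvBounds r).map (· + 1) else (pvBounds r).map (· + 1)

-- Nat-index version of B's slicing loop
def pvSliceGroups (full : List (List (String × String))) (p : Nat) (bs : List Nat) :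
    List (List (List (String × String))) :=
  match bs with
  | [] => []
  | b :: rest => (full.drop p).take (b + 1 - p) :: pvSliceGroups full (b + 1) rest

lemma pvStepA_true (s : List (List (List (String × String))) × List (List (String × String)))
    (c : List (String × String)) (h : pvIsA c = true) :
    pvStepA s c = (s.1 ++ [s.2 ++ [c]], []) := by
  simp only [pvStepA]
  rw [if_pos (by simpa [pvIsA] using h)]

lemma pvStepA_false (s : List (List (List (String × String))) × List (List (String × String)))
    (c : List (String × String)) (h : ¬ pvIsA c = true) :
    pvStepA s c = (s.1, s.2 ++ [c]) := by
  simp only [pvStepA]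
  rw [if_neg (by simpa [pvIsA] using h)]

lemma pvA_foldl (cs : List (List (String × String))) (paired : List (List (List (String × String))))
    (temp : List (List (String × String))) :
    (cs.foldl pvStepA (paired, temp)).1 = paired ++ pvCore cs temp := by
  induction cs generalizing paired temp with
  | nil => simp [pvCore]
  | cons c r ih =>
    rw [List.foldl_cons]
    by_cases h : pvIsA c
    · rw [pvStepA_true _ _ h, ih]
      simp [pvCore, h]
    · rw [pvStepA_false _ _ h, ih]
      simp [pvCore, h]

lemma pvBounds_enum (cs : List (List (String × String))) (s : Int) :
    ((PySem.List.enumerate cs s).filter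
      (fun p => PySem.Dict.get? (PySem.Dict.mk p.2) "role" == some "assistant")).map (·.1)
      = (pvBounds cs).map (fun k : Nat => s + (k : Int)) := by
  induction cs generalizing s with
  | nil => simp [PySem.List.enumerate_nil, pvBounds]
  | cons c r ih =>
    rw [PySem.List.enumerate_cons]
    have h' : pvIsA c = (PySem.Dict.get? (PySem.Dict.mk c) "role" == some "assistant") := rfl
    by_cases h : pvIsA c
    · simp only [pvBounds, h, if_true, List.filter_cons, ← h', List.map_cons, List.map_map, ih]
      congr 1
      · simp
      apply List.map_congr_left
      intro k _
      simp only [Function.comp_apply]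
      push_cast
      ring
    · simp only [pvBounds, h, if_false, List.filter_cons, ← h', Bool.false_eq_true, List.map_map, ih]
      apply List.map_congr_left
      intro k _
      simp only [Function.comp_apply]
      push_cast
      ring

lemma pvB_foldl (full : List (List (String × String))) (bs : List Nat) (p : Nat)
    (groups : List (List (List (String × String)))) :
    ((bs.map (fun k : Nat => (k : Int))).foldl (pvStepB full) (groups, (p : Int))).1
      = groups ++ pvSliceGroups full p bs := by
  induction bs generalizing p groups with
  | nil => simp [pvSliceGroups]
  | cons b rest ih =>
    simp only [List.map_cons, List.foldl_cons, pvStepB, pvSliceGroups]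
    have hc : ((b : Int) + 1) = ((b + 1 : Nat) : Int) := by push_cast; ring
    rw [hc, PySem.List.slice_natCast, ih (b + 1) _]
    simp [List.append_assoc]

lemma pvSliceGroups_shift (x full : List (List (String × String))) (p : Nat) (bs : List Nat) :
    pvSliceGroups (x ++ full) (x.length + p) (bs.map (x.length + ·)) = pvSliceGroups full p bs := by
  induction bs generalizing p with
  | nil => simp [pvSliceGroups]
  | cons b rest ih =>
    simp only [List.map_cons, pvSliceGroups]
    rw [List.drop_length_add_append]
    have h1 : x.length + b + 1 - (x.length + p) = b + 1 - p := by omega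
    have h2 : x.length + b + 1 = x.length + (b + 1) := by omega
    rw [h1, h2, ih (b + 1)]

lemma pvSlice_core (cs : List (List (String × String))) (pre : List (List (String × String))) :
    pvSliceGroups (pre ++ cs) 0 ((pvBounds cs).map (pre.length + ·)) = pvCore cs pre := by
  induction cs generalizing pre with
  | nil => simp [pvBounds, pvSliceGroups, pvCore]
  | cons c r ih =>
    by_cases h : pvIsA c
    · simp only [pvBounds, pvCore, h, if_true, List.map_cons, List.map_map,
        pvSliceGroups]
      congr 1
      · rw [List.drop_zero, Nat.sub_zero]
        have hl : pre.length + 0 + 1 = pre.length + 1 := by omega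
        rw [hl, List.take_length_add_append]
        simp
      · have hmap : ((pvBounds r).map ((pre.length + ·) ∘ (· + 1)))
            = (pvBounds r).map ((pre ++ [c]).length + ·) := by
          apply List.map_congr_left; intro k _; simp only [Function.comp_apply,
            List.length_append, List.length_cons, List.length_nil]; omega
        have hfull : pre ++ c :: r = (pre ++ [c]) ++ r := by simp
        have hp : pre.length + 0 + 1 = (pre ++ [c]).length + 0 := by simp
        rw [hmap, hfull, hp, pvSliceGroups_shift]
        have := ih []
        simpa using this
    · have h' : pvIsA c = false := by simpa using h
      simp only [pvBounds, pvCore, h', Bool.false_eq_true, if_false, List.map_map]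
      have hmap : ((pvBounds r).map ((pre.length + ·) ∘ (· + 1)))
          = (pvBounds r).map ((pre ++ [c]).length + ·) := by
        apply List.map_congr_left; intro k _; simp only [Function.comp_apply,
          List.length_append, List.length_cons, List.length_nil]; omega
      have hfull : pre ++ c :: r = (pre ++ [c]) ++ r := by simp
      rw [hmap, hfull, ih (pre ++ [c])]

-- ===== VERDICT (by name: the statement is the Claim_ definition above) =====
theorem pair_conversations_spec : Claim_equal_pair_conversations := by
  intro cs _ _
  show pair_conversations cs = pair_conversations_alt cs
  simp only [pair_conversations, pair_conversations_alt]
  rw [pvA_foldl cs [] [], pvBounds_enum cs 0]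
  have hmap : ((pvBounds cs).map (fun k : Nat => (0 : Int) + (k : Int)))
      = (pvBounds cs).map (fun k : Nat => (k : Int)) := by
    apply List.map_congr_left; intro k _; ring
  rw [hmap]
  have hB := pvB_foldl cs (pvBounds cs) 0 []
  simp only [Nat.cast_zero] at hB
  rw [hB]
  have := pvSlice_core cs []
  simpa using this.symm
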